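-- pv_equiv track=rewrite | github.com/slawekradzyminski/perceptron | backend/datasets.py | generate_translations
-- ===== SOURCE A (Python) =====
-- from typing import Iterable, List, Sequence, Tuple
--
-- def _pm1(val: int) -> int:
--     return 1 if val > 0 else -1
--
-- def generate_translations(
--     shape_mask: Sequence[Sequence[int]],
--     board_h: int,
--     board_w: int,
-- ) -> List[Tuple[List[List[int]], Tuple[int, int]]]:
--     """Return all valid translations of a shape on a board.
--
--     Cells belonging to the shape are +1, empty cells are -1.
--     Returns list of (grid, (top, left)).
--     """
--     shape_h = len(shape_mask)
--     shape_w = len(shape_mask[0]) if shape_h > 0 else 0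
--     if shape_h == 0 or shape_w == 0:
--         raise ValueError("shape_mask must be non-empty")
--     if board_h < shape_h or board_w < shape_w:
--         raise ValueError("board must be at least as large as shape")
--
--     positions: List[Tuple[List[List[int]], Tuple[int, int]]] = []
--     for top in range(board_h - shape_h + 1):
--         for left in range(board_w - shape_w + 1):
--             grid = [[-1 for _ in range(board_w)] for _ in range(board_h)]
--             for r in range(shape_h):
--                 for c in range(shape_w):
--                     if _pm1(shape_mask[r][c]) == 1:
--                         grid[top + r][left + c] = 1
--             positions.append((grid, (top, left)))
--     return positions
-- ===== SOURCE B (Python) =====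
-- def generate_translations(shape_mask, board_h, board_w):
--     """Return all valid translations of a shape on a board.
--
--     Cells belonging to the shape are +1, empty cells are -1.
--     Returns list of (grid, (top, left)).
--     """
--     shape_h = len(shape_mask)
--     shape_w = len(shape_mask[0]) if shape_h > 0 else 0
--     if shape_h == 0 or shape_w == 0:
--         raise ValueError("shape_mask must be non-empty")
--     if board_h < shape_h or board_w < shape_w:
--         raise ValueError("board must be at least as large as shape")
--
--     # Precompute the +/-1 stamp of the shape once; each grid is then
--     # assembled row-wise by concatenation instead of per-cell mutation.
--     stamped = [[1 if v > 0 else -1 for v in row[:shape_w]] for row in shape_mask]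
--     positions = []
--     for top in range(board_h - shape_h + 1):
--         for left in range(board_w - shape_w + 1):
--             right = board_w - left - shape_w
--             grid = [[-1] * board_w for _ in range(top)]
--             for srow in stamped:
--                 grid.append([-1] * left + srow + [-1] * right)
--             grid += [[-1] * board_w for _ in range(board_h - top - shape_h)]
--             positions.append((grid, (top, left)))
--     return positions
-- ===== Notes on version B (the rewrite author's own statement) =====
-- stated objective: alternative
-- what changed: B precomputes the shape's +/-1 stamp once and assembles each grid row-wise by list concatenation (prefix rows, padded stamped rows, suffix rows) instead of A's per-position allocation of a full board followed by per-cell in-place mutation over the whole shape.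
import Mathlib
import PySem

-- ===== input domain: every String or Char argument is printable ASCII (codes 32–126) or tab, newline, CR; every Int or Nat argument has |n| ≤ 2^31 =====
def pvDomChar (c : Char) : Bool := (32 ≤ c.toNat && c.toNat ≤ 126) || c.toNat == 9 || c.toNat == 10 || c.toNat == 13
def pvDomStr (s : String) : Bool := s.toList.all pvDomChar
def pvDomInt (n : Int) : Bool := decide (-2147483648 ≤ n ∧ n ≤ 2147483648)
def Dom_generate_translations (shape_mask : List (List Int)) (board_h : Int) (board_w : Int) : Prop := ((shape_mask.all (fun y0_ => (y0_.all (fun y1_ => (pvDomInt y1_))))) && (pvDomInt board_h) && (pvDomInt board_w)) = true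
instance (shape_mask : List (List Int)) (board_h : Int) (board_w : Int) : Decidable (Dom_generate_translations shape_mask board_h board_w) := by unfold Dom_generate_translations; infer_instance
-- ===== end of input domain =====

-- B replaces A's per-cell in-place stamping of each fresh board with a once-precomputed ±1 stamp of the
-- shape and row-wise grid assembly by concatenation (same values, same order; objective: alternative).

-- ===== PORT A =====
def pvPm1 (val : Int) : Int := if val > 0 then 1 else -1

-- grid[i][j] = v for in-range nonnegative i, j (the only indices A uses under Pre_)
def pvSetCell (g : List (List Int)) (i j : Int) (v : Int) : List (List Int) :=
  g.set i.toNat ((g.getD i.toNat []).set j.toNat v)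

def generate_translations (shape_mask : List (List Int)) (board_h : Int) (board_w : Int) : List (List (List Int) × (Int × Int)) :=
  let shape_h : Int := shape_mask.length
  let shape_w : Int := if shape_h > 0 then ((shape_mask.headD []).length : Int) else 0
  if shape_h = 0 ∨ shape_w = 0 then []            -- Python: raise ValueError (excluded by Pre_)
  else if board_h < shape_h ∨ board_w < shape_w then []   -- Python: raise ValueError (excluded by Pre_)
  else
    (PySem.List.pyRange 0 (board_h - shape_h + 1) 1).foldl (fun positions top =>
      (PySem.List.pyRange 0 (board_w - shape_w + 1) 1).foldl (fun positions left =>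
        let grid0 := (PySem.List.pyRange 0 board_h 1).map (fun _ =>
          (PySem.List.pyRange 0 board_w 1).map (fun _ => (-1 : Int)))
        let grid := (PySem.List.pyRange 0 shape_h 1).foldl (fun g r =>
          (PySem.List.pyRange 0 shape_w 1).foldl (fun g c =>
            if pvPm1 (PySem.List.pyGetD (PySem.List.pyGetD shape_mask r []) c 0) = 1 then
              pvSetCell g (top + r) (left + c) 1
            else g) g) grid0
        positions ++ [(grid, (top, left))]) positions) []

-- ===== PORT B =====
def generate_translations_alt (shape_mask : List (List Int)) (board_h : Int) (board_w : Int) : List (List (List Int) × (Int × Int)) :=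
  let shape_h : Int := shape_mask.length
  let shape_w : Int := if shape_h > 0 then ((shape_mask.headD []).length : Int) else 0
  if shape_h = 0 ∨ shape_w = 0 then []            -- Python: raise ValueError (excluded by Pre_)
  else if board_h < shape_h ∨ board_w < shape_w then []   -- Python: raise ValueError (excluded by Pre_)
  else
    let stamped := shape_mask.map (fun row =>
      (row.take shape_w.toNat).map (fun v => if v > 0 then (1 : Int) else -1))
    (PySem.List.pyRange 0 (board_h - shape_h + 1) 1).foldl (fun positions top =>
      (PySem.List.pyRange 0 (board_w - shape_w + 1) 1).foldl (fun positions left =>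
        let right := board_w - left - shape_w
        let grid :=
          (PySem.List.pyRange 0 top 1).map (fun _ => List.replicate board_w.toNat (-1 : Int))
          ++ stamped.map (fun srow =>
               List.replicate left.toNat (-1 : Int) ++ srow ++ List.replicate right.toNat (-1 : Int))
          ++ (PySem.List.pyRange 0 (board_h - top - shape_h) 1).map (fun _ => List.replicate board_w.toNat (-1 : Int))
        positions ++ [(grid, (top, left))]) positions) []

-- ===== PRECONDITION & SPEC =====
-- Pre_ excludes exactly the inputs on which A raises: an empty mask or empty first row and a board
-- smaller than the shape (ValueError), and ragged masks with a row shorter than the first row (IndexError).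
def Pre_generate_translations (shape_mask : List (List Int)) (board_h : Int) (board_w : Int) : Prop :=
  shape_mask ≠ [] ∧ shape_mask.headD [] ≠ [] ∧
  (∀ row ∈ shape_mask, (shape_mask.headD []).length ≤ row.length) ∧
  (shape_mask.length : Int) ≤ board_h ∧ ((shape_mask.headD []).length : Int) ≤ board_w
instance (shape_mask : List (List Int)) (board_h : Int) (board_w : Int) : Decidable (Pre_generate_translations shape_mask board_h board_w) := by unfold Pre_generate_translations; infer_instance

def pvWitness_generate_translations : List (List Int) × Int × Int := ([[1, 0], [0, 1]], 3, 2)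

def Spec_generate_translations (shape_mask : List (List Int)) (board_h : Int) (board_w : Int) (out : List (List (List Int) × (Int × Int))) : Prop := out = generate_translations_alt shape_mask board_h board_w
instance (shape_mask : List (List Int)) (board_h : Int) (board_w : Int) (out : List (List (List Int) × (Int × Int))) : Decidable (Spec_generate_translations shape_mask board_h board_w out) := by unfold Spec_generate_translations; infer_instance

-- ===== CLAIM (what is proved, stated in full; the proofs are below) =====
def Claim_equal_generate_translations : Prop := ∀ (shape_mask : List (List Int)) (board_h : Int) (board_w : Int), Dom_generate_translations shape_mask board_h board_w → Pre_generate_translations shape_mask board_h board_w → Spec_generate_translations shape_mask board_h board_w (generate_translations shape_mask board_h board_w)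

-- ===== LEMMAS AND PROOFS =====

-- range(n) comprehension of a constant is a replicate
lemma pv_map_const_pyRange {α : Type} (n : Int) (x : α) :
    (PySem.List.pyRange 0 n 1).map (fun _ => x) = List.replicate n.toNat x := by
  rw [List.map_const']
  simp [PySem.List.length_pyRange_one]

-- a fold whose every step only rewrites row I of the grid factors through that row
lemma pv_colFold (cs : List Int) (cond : Int → Prop) [DecidablePred cond] (J : Int → Nat) :
    ∀ (g : List (List Int)) (I : Nat), I < g.length →
    cs.foldl (fun g c => if cond c then g.set I ((g.getD I []).set (J c) 1) else g) g
      = g.set I (cs.foldl (fun row c => if cond c then row.set (J c) 1 else row) (g.getD I [])) := by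
  induction cs with
  | nil =>
    intro g I hI
    simp only [List.foldl_nil]
    rw [List.getD_eq_getElem g [] hI, List.set_getElem_self]
  | cons c cs ih =>
    intro g I hI
    by_cases hc : cond c
    · simp only [List.foldl_cons, if_pos hc]
      rw [ih _ I (by simpa using hI)]
      rw [List.set_set]
      congr 1
      rw [List.getD_eq_getElem _ [] (by simpa using hI), List.getElem_set_self]
    · simp only [List.foldl_cons, if_neg hc]
      exact ih g I hI

-- stamping one mask row into an all-(-1) row of width W
lemma pv_rowStamp (mrow : List Int) (l W : Nat) :
    ∀ (k : Nat), k ≤ mrow.length → l + k ≤ W →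
    (PySem.List.pyRange 0 (k : Int) 1).foldl
      (fun row c => if pvPm1 (PySem.List.pyGetD mrow c 0) = 1 then row.set (((l : Int) + c).toNat) 1 else row)
      (List.replicate W (-1 : Int))
    = List.replicate l (-1) ++ (mrow.take k).map (fun v => if v > 0 then (1 : Int) else -1)
        ++ List.replicate (W - l - k) (-1 : Int) := by
  intro k
  induction k with
  | zero =>
    intro _ hW
    rw [PySem.List.pyRange_one_eq_nil (by omega)]
    simp only [List.foldl_nil, List.take_zero, List.map_nil, List.append_nil]
    rw [← List.replicate_add]
    congr 1
    omega
  | succ k ih =>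
    intro hk hW
    have hcast : ((k + 1 : ℕ) : ℤ) = (k : ℤ) + 1 := by push_cast; ring
    rw [hcast, PySem.List.pyRange_one_succ_right (by omega), List.foldl_append]
    rw [ih (by omega) (by omega)]
    have hklen : k < mrow.length := by omega
    have hget : PySem.List.pyGetD mrow (k : Int) 0 = mrow[k] := by
      rw [PySem.List.pyGetD_eq_getElem mrow 0 (by omega) (by simp; omega)]
      simp
    have htake : mrow.take (k + 1)
        = mrow.take k ++ [mrow[k]] := by
      rw [List.take_add_one]; simp [List.getElem?_eq_getElem hklen]
    have hlen2 : (List.replicate l (-1 : Int)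
        ++ (mrow.take k).map (fun v => if v > 0 then (1 : Int) else -1)).length = l + k := by
      simp [List.length_take, Nat.min_eq_left (le_of_lt hklen)]
    have hrep : List.replicate (W - l - k) (-1 : Int)
        = -1 :: List.replicate (W - l - (k + 1)) (-1 : Int) := by
      rw [show W - l - k = (W - l - (k + 1)) + 1 by omega, List.replicate_succ]
    simp only [List.foldl_cons, List.foldl_nil, hget]
    by_cases hpos : mrow[k] > 0
    · rw [if_pos (by simp [pvPm1, hpos])]
      have hidx : (((l : Int) + (k : Int)).toNat) = l + k := by omega
      rw [hidx, List.set_append_right _ _ (by omega)]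
      simp only [hlen2, Nat.sub_self, hrep, List.set_cons_zero]
      rw [htake, List.map_append]
      simp [hpos, List.append_assoc]
    · rw [if_neg (by simp [pvPm1, hpos])]
      rw [htake, List.map_append, hrep]
      simp [hpos, List.append_assoc]

-- the full row-by-row stamping fold of A, characterised as B's concatenation
lemma pv_gridIter (sm : List (List Int)) (t l H W : Nat)
    (hrow : ∀ row ∈ sm, (sm.headD []).length ≤ row.length)
    (hH : t + sm.length ≤ H) (hW : l + (sm.headD []).length ≤ W) :
    ∀ (k : Nat), k ≤ sm.length →
    (PySem.List.pyRange 0 (k : Int) 1).foldl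
      (fun g r => (PySem.List.pyRange 0 ((sm.headD []).length : Int) 1).foldl
        (fun g c =>
          if pvPm1 (PySem.List.pyGetD (PySem.List.pyGetD sm r []) c 0) = 1 then
            pvSetCell g ((t : Int) + r) ((l : Int) + c) 1
          else g) g)
      (List.replicate H (List.replicate W (-1 : Int)))
    = List.replicate t (List.replicate W (-1 : Int))
        ++ (sm.take k).map (fun row =>
              List.replicate l (-1 : Int)
              ++ (row.take (sm.headD []).length).map (fun v => if v > 0 then (1 : Int) else -1)
              ++ List.replicate (W - l - (sm.headD []).length) (-1 : Int))
        ++ List.replicate (H - t - k) (List.replicate W (-1 : Int)) := by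
  intro k
  induction k with
  | zero =>
    intro _
    rw [PySem.List.pyRange_one_eq_nil (b := ((0 : ℕ) : ℤ)) (by omega)]
    simp only [List.foldl_nil, List.take_zero, List.map_nil, List.append_nil]
    rw [← List.replicate_add]
    congr 1
    omega
  | succ k ih =>
    intro hk
    have hcast : ((k + 1 : ℕ) : ℤ) = (k : ℤ) + 1 := by push_cast; ring
    rw [hcast, PySem.List.pyRange_one_succ_right (by omega), List.foldl_append]
    rw [ih (by omega)]
    have hklen : k < sm.length := by omega
    set stamp : List Int → List Int := fun row =>
      List.replicate l (-1 : Int)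
      ++ (row.take (sm.headD []).length).map (fun v => if v > 0 then (1 : Int) else -1)
      ++ List.replicate (W - l - (sm.headD []).length) (-1 : Int) with hstamp
    have hlen1 : ((sm.take k).map stamp).length = k := by
      simp [List.length_take, Nat.min_eq_left (le_of_lt hklen)]
    have hlenG : (List.replicate t (List.replicate W (-1 : Int)) ++ (sm.take k).map stamp
        ++ List.replicate (H - t - k) (List.replicate W (-1 : Int))).length = H := by
      simp; omega
    have hmem : sm[k] ∈ sm := List.getElem_mem hklen
    have hgetrow : PySem.List.pyGetD sm (k : Int) [] = sm[k] := by
      rw [PySem.List.pyGetD_eq_getElem sm [] (by omega) (by simp; omega)]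
      simp
    simp only [List.foldl_cons, List.foldl_nil, hgetrow]
    have hI : ((t : Int) + (k : Int)).toNat = t + k := by omega
    simp only [pvSetCell, hI]
    rw [pv_colFold _ _ _ _ (t + k) (by rw [hlenG]; omega)]
    have hgd : (List.replicate t (List.replicate W (-1 : Int)) ++ (sm.take k).map stamp
        ++ List.replicate (H - t - k) (List.replicate W (-1 : Int))).getD (t + k) []
        = List.replicate W (-1 : Int) := by
      rw [List.getD_eq_getElem _ [] (by rw [hlenG]; omega)]
      rw [List.getElem_append_right
        (by simp only [List.length_append, List.length_replicate, hlen1]; omega)]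
      exact List.getElem_replicate _
    rw [hgd]
    rw [pv_rowStamp sm[k] l W (sm.headD []).length (hrow _ hmem) hW]
    have htake : sm.take (k + 1) = sm.take k ++ [sm[k]] := by
      rw [List.take_add_one]; simp [List.getElem?_eq_getElem hklen]
    have hrep : List.replicate (H - t - k) (List.replicate W (-1 : Int))
        = List.replicate W (-1 : Int) :: List.replicate (H - t - (k + 1)) (List.replicate W (-1 : Int)) := by
      rw [show H - t - k = (H - t - (k + 1)) + 1 by omega, List.replicate_succ]
    have hlen12 : (List.replicate t (List.replicate W (-1 : Int)) ++ (sm.take k).map stamp).length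
        = t + k := by simp; omega
    rw [List.set_append_right _ _ (by omega)]
    simp only [hlen12, Nat.sub_self, hrep, List.set_cons_zero]
    rw [htake, List.map_append]
    simp [List.append_assoc, hstamp]

-- the single-grid equality at one (top, left) position
lemma pv_grid_eq (sm : List (List Int)) (bh bw top left : Int)
    (hrow : ∀ row ∈ sm, (sm.headD []).length ≤ row.length)
    (htop : 0 ≤ top) (hleft : 0 ≤ left)
    (hbh : top + (sm.length : Int) ≤ bh) (hbw : left + ((sm.headD []).length : Int) ≤ bw) :
    (PySem.List.pyRange 0 (sm.length : Int) 1).foldl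
      (fun g r => (PySem.List.pyRange 0 ((sm.headD []).length : Int) 1).foldl
        (fun g c =>
          if pvPm1 (PySem.List.pyGetD (PySem.List.pyGetD sm r []) c 0) = 1 then
            pvSetCell g (top + r) (left + c) 1
          else g) g)
      ((PySem.List.pyRange 0 bh 1).map (fun _ => (PySem.List.pyRange 0 bw 1).map (fun _ => (-1 : Int))))
    = (PySem.List.pyRange 0 top 1).map (fun _ => List.replicate bw.toNat (-1 : Int))
      ++ (sm.map (fun row =>
            (row.take ((sm.headD []).length : Int).toNat).map (fun v => if v > 0 then (1 : Int) else -1))).map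
           (fun srow => List.replicate left.toNat (-1 : Int) ++ srow
              ++ List.replicate (bw - left - ((sm.headD []).length : Int)).toNat (-1 : Int))
      ++ (PySem.List.pyRange 0 (bh - top - (sm.length : Int)) 1).map
           (fun _ => List.replicate bw.toNat (-1 : Int)) := by
  obtain ⟨t, rfl⟩ : ∃ n : ℕ, top = (n : Int) := ⟨top.toNat, by omega⟩
  obtain ⟨lf, rfl⟩ : ∃ n : ℕ, left = (n : Int) := ⟨left.toNat, by omega⟩
  rw [pv_map_const_pyRange, pv_map_const_pyRange bw, pv_map_const_pyRange ((t : ℕ) : Int),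
      pv_map_const_pyRange (bh - ((t : ℕ) : Int) - (sm.length : Int))]
  rw [pv_gridIter sm t lf bh.toNat bw.toNat hrow (by omega) (by omega) sm.length (le_refl _)]
  rw [List.take_length, List.map_map]
  have h1 : (bh - ((t : ℕ) : Int) - (sm.length : Int)).toNat = bh.toNat - t - sm.length := by omega
  have h2 : (bw - ((lf : ℕ) : Int) - ((sm.headD []).length : Int)).toNat
      = bw.toNat - lf - (sm.headD []).length := by omega
  have h3 : (((t : ℕ) : Int)).toNat = t := by omega
  have h4 : (((lf : ℕ) : Int)).toNat = lf := by omega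
  have h5 : (((sm.headD []).length : Int)).toNat = (sm.headD []).length := by omega
  rw [h1, h2, h3, h4, h5]
  rfl

-- ===== VERDICT (by name: the statement is the Claim_ definition above) =====
theorem generate_translations_spec : Claim_equal_generate_translations := by
  intro sm bh bw _ hpre
  obtain ⟨hne, hhead, hrow, hbh, hbw⟩ := hpre
  unfold Spec_generate_translations generate_translations generate_translations_alt
  have hsh : (sm.length : Int) > 0 := by
    have := List.length_pos_iff.mpr hne; omega
  have hsw : ((sm.headD []).length : Int) > 0 := by
    have := List.length_pos_iff.mpr hhead; omega
  simp only [if_pos hsh]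
  rw [if_neg (by omega), if_neg (by omega), if_neg (by omega), if_neg (by omega)]
  apply PySem.List.foldl_congr_mem
  intro acc top htopmem
  apply PySem.List.foldl_congr_mem
  intro acc' left hleftmem
  rw [PySem.List.mem_pyRange_one] at htopmem hleftmem
  rw [pv_grid_eq sm bh bw top left hrow htopmem.1 hleftmem.1 (by omega) (by omega)]
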